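-- pv_equiv track=rewrite | github.com/gablg1/ORGAN | organ/music_metrics.py | notes_and_successors
-- ===== SOURCE A (Python) =====
-- def notes_and_successors(sequence):
--
--     processed = []
--     current_note = None
--     for note in sequence:
--         if note == 1:
--             if current_note is None:
--                 raise ValueError('Incorrect sequence')
--             else:
--                 processed.append(current_note)
--         else:
--             current_note = note
--             processed.append(current_note)
--
--     return [(note, processed[i+1]) for i, note in enumerate(processed[:-1])]
-- ===== SOURCE B (Python) =====
-- def notes_and_successors(sequence):
--     # One pass: the previously processed value doubles as the "current note",
--     # since every processed value equals current_note at that moment.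
--     result = []
--     prev = None
--     for note in sequence:
--         if note == 1:
--             if prev is None:
--                 raise ValueError('Incorrect sequence')
--             value = prev
--         else:
--             value = note
--         if prev is not None:
--             result.append((prev, value))
--         prev = value
--     return result
-- ===== Notes on version B (the rewrite author's own statement) =====
-- stated objective: simpler
-- what changed: B fuses A's two passes (build the processed list, then pair it with itself by index via enumerate/slice) into a single loop that keeps only the previous processed value and emits each (prev, value) pair directly, never materialising the processed list.
import Mathlib
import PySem

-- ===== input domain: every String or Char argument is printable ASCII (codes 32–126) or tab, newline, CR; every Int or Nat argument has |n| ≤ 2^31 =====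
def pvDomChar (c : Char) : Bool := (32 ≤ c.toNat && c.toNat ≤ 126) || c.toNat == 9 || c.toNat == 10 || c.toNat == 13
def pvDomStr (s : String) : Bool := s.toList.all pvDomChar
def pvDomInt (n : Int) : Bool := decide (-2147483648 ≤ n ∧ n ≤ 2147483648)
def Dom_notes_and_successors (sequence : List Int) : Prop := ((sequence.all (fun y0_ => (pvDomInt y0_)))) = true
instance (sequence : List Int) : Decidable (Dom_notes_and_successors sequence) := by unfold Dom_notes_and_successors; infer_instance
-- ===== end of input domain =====

-- B fuses A's two passes (build `processed`, then pair by index) into one pass that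
-- emits each (prev, value) pair directly; same O(n) cost, simpler single loop.

-- ===== PORT A =====
-- the first loop of A: builds `processed`; none = the ValueError path (excluded by Pre_)
def pvProcA : List Int → Option Int → Option (List Int)
  | [], _ => some []
  | note :: rest, cur =>
    if note = 1 then
      match cur with
      | none => none  -- raise ValueError('Incorrect sequence')
      | some c => (pvProcA rest (some c)).map (c :: ·)
    else (pvProcA rest (some note)).map (note :: ·)

def notes_and_successors (sequence : List Int) : List (Int × Int) :=
  match pvProcA sequence none with
  | none => []  -- ValueError path, excluded by Pre_
  | some processed =>
      -- [(note, processed[i+1]) for i, note in enumerate(processed[:-1])]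
      -- the index i+1 is always in range, so the pyGetD default 0 is never used
      (PySem.List.enumerate (PySem.List.slice processed none (some (-1))) 0).map
        (fun p => (p.2, PySem.List.pyGetD processed (p.1 + 1) 0))

-- ===== PORT B =====
-- B's single loop: prev = last processed value (doubles as current_note); none result = ValueError
def pvLoopB : List Int → Option Int → List (Int × Int) → Option (List (Int × Int))
  | [], _, acc => some acc
  | note :: rest, prev, acc =>
    if note = 1 then
      match prev with
      | none => none  -- raise ValueError('Incorrect sequence')
      | some p => pvLoopB rest (some p) (acc ++ [(p, p)])
    else
      match prev with
      | none => pvLoopB rest (some note) acc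
      | some p => pvLoopB rest (some note) (acc ++ [(p, note)])

def notes_and_successors_alt (sequence : List Int) : List (Int × Int) :=
  (pvLoopB sequence none []).getD []

-- ===== PRECONDITION & SPEC =====
-- Pre_ excludes exactly the sequences starting with 1, on which A raises ValueError
-- (a leading 1 has no current_note to resolve to); B raises there too.
def Pre_notes_and_successors (sequence : List Int) : Prop := sequence.head? ≠ some 1
instance (sequence : List Int) : Decidable (Pre_notes_and_successors sequence) := by
  unfold Pre_notes_and_successors; infer_instance

def pvWitness_notes_and_successors : List Int := [60, 1, 62, 1]

def Spec_notes_and_successors (sequence : List Int) (out : List (Int × Int)) : Prop := out = notes_and_successors_alt sequence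
instance (sequence : List Int) (out : List (Int × Int)) : Decidable (Spec_notes_and_successors sequence out) := by unfold Spec_notes_and_successors; infer_instance

-- ===== CLAIM (what is proved, stated in full; the proofs are below) =====
def Claim_equal_notes_and_successors : Prop := ∀ (sequence : List Int), Dom_notes_and_successors sequence → Pre_notes_and_successors sequence → Spec_notes_and_successors sequence (notes_and_successors sequence)

-- ===== LEMMAS AND PROOFS =====

-- total version of A's first loop once current_note is set (no error possible)
def pvProc' : List Int → Int → List Int
  | [], _ => []
  | note :: rest, c => if note = 1 then c :: pvProc' rest c else note :: pvProc' rest note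

-- consecutive pairs of c :: xs
def pvLink : Int → List Int → List (Int × Int)
  | _, [] => []
  | c, x :: xs => (c, x) :: pvLink x xs

theorem pvProcA_some (rest : List Int) (c : Int) :
    pvProcA rest (some c) = some (pvProc' rest c) := by
  induction rest generalizing c with
  | nil => rfl
  | cons n t ih =>
    simp only [pvProcA, pvProc']
    split_ifs with h <;> simp [ih]

theorem pvLoopB_some (rest : List Int) (c : Int) (acc : List (Int × Int)) :
    pvLoopB rest (some c) acc = some (acc ++ pvLink c (pvProc' rest c)) := by
  induction rest generalizing c acc with
  | nil => simp [pvLoopB, pvProc', pvLink]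
  | cons n t ih =>
    simp only [pvLoopB, pvProc']
    split_ifs with h <;> simp [ih, pvLink]

theorem zip_tail_eq_pvLink (c : Int) (xs : List Int) :
    (c :: xs).zip xs = pvLink c xs := by
  induction xs generalizing c with
  | nil => rfl
  | cons x t ih => simpa [pvLink, List.zip] using ih x

-- A's comprehension computes the consecutive pairs of processed
theorem pairsA_eq_zip (p : List Int) :
    (PySem.List.enumerate (PySem.List.slice p none (some (-1))) 0).map
        (fun q => (q.2, PySem.List.pyGetD p (q.1 + 1) 0))
      = p.zip p.tail := by
  rw [PySem.List.slice_to_neg_one]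
  apply List.ext_getElem
  · simp [PySem.List.length_enumerate, List.length_dropLast]
  · intro i h1 h2
    have hi : i < p.length - 1 := by
      simpa [PySem.List.length_enumerate, List.length_dropLast] using h1
    have hip : i + 1 < p.length := by omega
    simp only [List.getElem_map, PySem.List.getElem_enumerate, List.getElem_zip,
      List.getElem_dropLast, List.getElem_tail]
    congr 1
    have : ((0 : Int) + (i : Int)) + 1 = ((i + 1 : Nat) : Int) := by push_cast; ring
    rw [this, PySem.List.pyGetD_natCast]
    simp [List.getD_eq_getElem?_getD, hip]

-- ===== VERDICT (by name: the statement is the Claim_ definition above) =====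
theorem notes_and_successors_spec : Claim_equal_notes_and_successors := by
  intro sequence _ hpre
  unfold Spec_notes_and_successors notes_and_successors notes_and_successors_alt
  cases sequence with
  | nil => rfl
  | cons h t =>
    have hne : h ≠ 1 := by
      intro hh; exact hpre (by simp [hh])
    simp only [pvProcA, pvLoopB, if_neg hne]
    rw [pvProcA_some, pvLoopB_some]
    simp only [Option.map_some, Option.getD_some, List.nil_append]
    rw [pairsA_eq_zip]
    exact zip_tail_eq_pvLink h (pvProc' t h)
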